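/- GENERATED by tools/from_farm_form.py from prooffarm-gif/accepted/DGifDecompressLine.10/Proof.lean (a worked proof of the farm's unit `DGifDecompressLine.10`,
   accepted by the verdict) — do not edit. -/
import Gif.Spec.Units.DGifDecompressLine_10
import Gif.Spec.Proved.DGifDecompressLine_10_Lemmas

open X86 X86.User Asan ProgX.Base ProgX.Base.Spec Gif.Spec

set_option maxRecDepth 4000
set_option maxHeartbeats 4000000

/-- Segment 10 of `DGifDecompressLine` (106E4BH … 106E67H and 106E05H … 106E4BH; l.955-960): ONE ROUND of the trace loop. From
`Trace` at the head: the loop test (`StackPtr ≤ 4094 ∧ CrntPrefix > ClearCode ∧ CrntPrefix ≤ 4095`, signed 32-bit compares)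
false: `Trace` behind the loop, nothing stored; true: the checked load `Suffix[CrntPrefix]`, the checked store
`Stack[StackPtr++] =`, the checked load `Prefix[CrntPrefix]` — each inside ITS OWN table —, and the head again with `k − 1`. -/
theorem Gif.Spec.Proved.DGifDecompressLine_10_ok : Gif.Spec.DGifDecompressLine_10.Statement := by
  intro Lay hLay μ hμ u₀ hcode h_load1 h_store1 h_load4 H rest frames F R n m k e ret v hat
  have hat0 := hat
  obtain ⟨hbody, hloc, h_r13, h_r15, h_rbx, h_si, h_spv, h_mu⟩ := hat
  -- 1. THE PRELUDE (the same in every segment of this function; Gif/Spec/LzwCarry.lean §2)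
  -- the entry state's facts: `he_room`, `he_top`, `he_retAddr`, …
  have he := hbody.entry
  v_entry he
  -- where gif and pv are (what `v_side` / `u_same` / `u_omega` need to place the loads and stores)
  have hgin := hbody.gif_inside
  have hpin := hbody.pv_inside
  -- the present state, in the walker's names
  have w_rip := hbody.rip
  have c_rsp : v.reg .rsp = e.reg .rsp - 200 := hbody.rsp
  have w_eq : Mem.EqOn ProgX.Base.L.textLo ProgX.Base.L.textHi u₀.mem v.mem := ProgX.Base.conv_code_eqOn hbody.code
  have hdf : v.flags .df = false := (show abiInv _ from hbody.abi).1
  have hmx : v.mxcsr &&& 0x1F80 = 0x1F80 := (show abiInv _ from hbody.abi).2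
  have hsse := ProgX.Base.sseOK_of_abiInv hbody.abi
  have w_kept : RegsKept [.rsp] v v := RegsKept.refl _ _
  -- 2. THE REGISTERS AND SLOTS THE SEGMENT READS
  -- `ebx` = StackPtr ≤ 4095: `movsxd rbx, ebx` is the register itself (a fact for the walker)
  have hsp31 : (v.reg .rbx).toNat < 2 ^ 31 := by omega
  -- `r15d` = ClearCode ≤ 256 [LZ2]
  have hclear := hbody.lz.clear
  have h15_31 : (v.reg .r15).toNat < 2 ^ 31 := by omega
  have k_stack : v.mem.readLE (e.reg .rsp - 192) 8 = F.pv + 344 := hloc.s_stack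
  have k_suffix : v.mem.readLE (e.reg .rsp - 176) 8 = F.pv + 4439 := hloc.s_suffix
  -- 3. THE WALK, FIRST PART: the loop test, up to the first check of the body (where `CrntPrefix` is known to be an index)
  u_walk hcode [hμ.vendor, Gif.Spec.sext32_small (v.reg .rbx) hsp31]
    until [Gif.L.DGifDecompressLine.chk22, Gif.L.DGifDecompressLine.at_106e67]
    span [ProgX.Base.L.textLo, ProgX.Base.L.textHi] side (v_side)
  · -- EXIT 0x106e67 from the `je` of l.956 (`StackPtr > 4094` or `CrntPrefix ≤ ClearCode`): nothing was stored, `Trace` again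
    refine ReachVia.done (Or.inr ⟨k, ?_⟩)
    refine hat0.moved w_rip w_rsp w_mem (w_kept .r13 rfl) (w_kept .r15 rfl) (w_kept .rbx rfl) ?_
    v_inv
  · -- 0x106e23: the loop test was true: `StackPtr ≤ 4094`; `CrntPrefix` sign-extends to the number `c`, `1 ≤ c ≤ 4095`
    obtain ⟨hsp, c, hc_lo, hc_hi, hsx⟩ :=
      Gif.Spec.DGifDecompressLine_10.dl10_test_true _ _ _ hsp31 h15_31 hbr_106e5c hbr_106e65
    rw [hsx] at w_rdi w_r12 w_rbp
    clear hbr_106e5c hbr_106e65 hsx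
    -- 4. THE WALK, SECOND PART: the body of the loop
    u_walk hcode [hμ.vendor] until [Gif.L.DGifDecompressLine.at_106e4b]
      span [ProgX.Base.L.textLo, ProgX.Base.L.textHi] side (v_side)
    -- THE CHECK GOALS: the table is live (`suffixLive`, `stackLive`, `prefixLive`: the index against THE ARRAY'S OWN count)
    case check_106e23 =>
      -- l.958 `Suffix[CrntPrefix]`: inside `Suffix[4096]`
      have hun : ShadowUntouched v.mem s_106e23.mem := by v_untouched
      have hl := suffixLive hbody.ok.pv_live rest (DGifDecompressLine.framesIn frames e) c (by omega)
      simp only [gfield] at hl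
      exact hl.accSmall hbody.inv.shadow hun _ 1 (by decide) (by u_omega) (by u_omega)
    case check_106e30 =>
      -- l.958 `Stack[StackPtr++] =`: inside `Stack[4095]` (`StackPtr ≤ 4094`)
      have hun : ShadowUntouched v.mem s_106e30.mem := by v_untouched
      have hl := stackLive hbody.ok.pv_live rest (DGifDecompressLine.framesIn frames e) (v.reg .rbx).toNat (by omega)
      simp only [gfield] at hl
      exact hl.accSmall hbody.inv.shadow hun _ 1 (by decide) (by u_omega) (by u_omega)
    case check_106e40 =>
      -- l.959 `Prefix[CrntPrefix]`: inside `Prefix[4096]`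
      have hun : ShadowUntouched v.mem s_106e40.mem := by v_untouched
      have hl := prefixLive hbody.ok.pv_live rest (DGifDecompressLine.framesIn frames e) c (by omega)
      simp only [gfield] at hl
      exact hl.accSmall hbody.inv.shadow hun _ 4 (by decide) (by u_omega) (by u_omega)
    -- EXIT 0x106e4b (l.955): the head again, `StackPtr + 1`: `Body` through the round's stores by `Body.carry`
    -- what was stored: the return addresses of the three checks, `Stack[StackPtr]`
    have hun : ShadowUntouched v.mem s_106e48.mem := by v_untouched
    have hsame : Mem.SameExcept [⟨(e.reg .rsp).toNat - 208, (e.reg .rsp).toNat - 200⟩, ⟨F.pv + 344, F.pv + 4439⟩]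
        v.mem s_106e48.mem := by
      rw [w_mem]
      u_same
    have habi : (conv u₀).inv s_106e48 := by v_inv
    obtain ⟨k_body, k_loc, k_mu, k_clear, k_eof⟩ :=
      hbody.carry (cut' := Gif.L.DGifDecompressLine.at_106e4b) w_rip w_rsp w_eq habi hun hsame (by dl_scratch)
    -- `i` in its spill slot: not stored to
    obtain ⟨i, k_i⟩ : ∃ i, v.mem.readLE (e.reg .rsp - 144) 4 = i := ⟨_, rfl⟩
    rw [k_i] at h_si
    have k_i' : s_106e48.mem.readLE (e.reg .rsp - 144) 4 = i := by u_frame k_i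
    -- `Trace` with `k − 1`: `Body`, `Locals`, then `r13`, `r15`, `rbx`, the two spill slots, the measure
    refine ReachVia.done (Or.inl ⟨k - 1, by omega, k_body, k_loc hloc, ?_, ?_, ?_, ?_, ?_, ?_⟩)
    · rw [w_kept .r13 rfl]
      exact h_r13
    · -- `r15d = ClearCode`: the field was not stored to
      rw [w_kept .r15 rfl, k_clear]
      exact h_r15
    · -- StackPtr + 1 + (k − 1) = 4095
      rw [w_rbx, Gif.Spec.lea32_succ _ (by omega)]
      omega
    · rw [k_i']
      exact h_si
    · u_frame h_spv
    · -- the measure: no store of the round touched it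
      rw [k_mu]
      exact h_mu
  · -- EXIT 0x106e67 from the `jle` of l.957 (`CrntPrefix > 4095`): nothing was stored, `Trace` again
    refine ReachVia.done (Or.inr ⟨k, ?_⟩)
    refine hat0.moved w_rip w_rsp w_mem (w_kept .r13 rfl) (w_kept .r15 rfl) (w_kept .rbx rfl) ?_
    v_inv
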